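-- pv_equiv track=rewrite | github.com/davetwchiu/finance-research-digest | scripts/build_breaking_summary.py | parse_latest_section
-- ===== SOURCE A (Python) =====
-- def parse_latest_section(md: str) -> tuple[str | None, list[str]]:
--     lines = md.splitlines()
--     current = None
--     sections: list[tuple[str, list[str]]] = []
--     buf: list[str] = []
--     for line in lines:
--         if line.startswith('## '):
--             if current is not None:
--                 sections.append((current, buf))
--             current = line[3:].strip()
--             buf = []
--         elif current is not None:
--             # Keep nested ### title lines inside the current timestamp block.
--             buf.append(line)
--     if current is not None:
--         sections.append((current, buf))
--     if not sections:
--         return None, []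
--     return sections[-1]
-- ===== SOURCE B (Python) =====
-- def parse_latest_section(md: str) -> tuple[str | None, list[str]]:
--     # Scan lines in reverse: the first '## ' header found is the last section;
--     # everything collected after it (in original order) is its body.
--     tail: list[str] = []
--     for line in reversed(md.splitlines()):
--         if line.startswith('## '):
--             return line[3:].strip(), tail
--         tail = [line] + tail
--     return None, []
-- ===== Notes on version B (the rewrite author's own statement) =====
-- stated objective: simpler
-- what changed: Instead of one forward pass accumulating every section into a list and taking its last element, B scans the lines in reverse and returns at the first '## ' header with the lines collected so far as the body.
import Mathlib
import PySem

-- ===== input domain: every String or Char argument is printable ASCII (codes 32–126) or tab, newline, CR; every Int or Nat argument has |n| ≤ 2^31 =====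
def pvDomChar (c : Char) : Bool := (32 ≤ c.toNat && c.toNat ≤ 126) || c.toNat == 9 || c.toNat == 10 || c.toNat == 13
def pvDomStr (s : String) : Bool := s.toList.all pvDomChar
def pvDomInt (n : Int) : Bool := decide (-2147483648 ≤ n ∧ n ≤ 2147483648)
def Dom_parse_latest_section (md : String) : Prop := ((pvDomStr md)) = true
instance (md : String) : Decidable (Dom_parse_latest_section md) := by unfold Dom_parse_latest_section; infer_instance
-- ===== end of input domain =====

-- B replaces A's forward pass that accumulates all sections by a reverse scan that stops
-- at the last '## ' header (objective: simpler).

-- ===== PORT A =====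
-- state = (current, sections, buf)
def pvAStep (st : Option String × List (String × List String) × List String) (line : String) :
    Option String × List (String × List String) × List String :=
  if PySem.Str.startswith line "## " then
    (some (PySem.Str.strip (PySem.Str.slice line (some 3) none)),
     (match st.1 with | some c => st.2.1 ++ [(c, st.2.2)] | none => st.2.1), [])
  else if st.1.isSome then (st.1, st.2.1, st.2.2 ++ [line]) else st

def parse_latest_section (md : String) : Option String × List String :=
  let st := (PySem.Str.splitlines md).foldl pvAStep (none, [], [])
  let sections := match st.1 with | some c => st.2.1 ++ [(c, st.2.2)] | none => st.2.1
  match PySem.List.pyGet? sections (-1) with   -- 'if not sections: return None, []; return sections[-1]'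
  | none => (none, [])
  | some p => (some p.1, p.2)

-- ===== PORT B =====
def pvBGo : List String → List String → Option String × List String
  | [], _ => (none, [])
  | line :: rest, tail =>
    if PySem.Str.startswith line "## " then
      (some (PySem.Str.strip (PySem.Str.slice line (some 3) none)), tail)
    else pvBGo rest (line :: tail)

def parse_latest_section_alt (md : String) : Option String × List String :=
  pvBGo (PySem.Str.splitlines md).reverse []

-- ===== PRECONDITION & SPEC =====
def Spec_parse_latest_section (md : String) (out : Option String × List String) : Prop := out = parse_latest_section_alt md
instance (md : String) (out : Option String × List String) : Decidable (Spec_parse_latest_section md out) := by unfold Spec_parse_latest_section; infer_instance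

-- ===== CLAIM (what is proved, stated in full; the proofs are below) =====
def Claim_equal_parse_latest_section : Prop := ∀ (md : String), Dom_parse_latest_section md → Spec_parse_latest_section md (parse_latest_section md)

-- ===== LEMMAS AND PROOFS =====

-- Invariant connecting A's forward fold with B's reverse scan: if the fold ends with no
-- current header, no section was ever opened and B returns (none, []); if it ends with
-- current = some t, B returns t together with the fold's buffer (plus whatever B already collected).
theorem pv_key (lines : List String) : ∀ acc : List String,
    ((lines.foldl pvAStep (none, [], [])).1 = none →
      (lines.foldl pvAStep (none, [], [])).2.1 = [] ∧ pvBGo lines.reverse acc = (none, [])) ∧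
    (∀ t, (lines.foldl pvAStep (none, [], [])).1 = some t →
      pvBGo lines.reverse acc = (some t, (lines.foldl pvAStep (none, [], [])).2.2 ++ acc)) := by
  induction lines using List.reverseRecOn with
  | nil => intro acc; exact ⟨fun _ => ⟨rfl, rfl⟩, fun t h => by simp at h⟩
  | append_singleton ls l ih =>
    intro acc
    rw [List.foldl_append, List.reverse_append]
    simp only [List.foldl_cons, List.foldl_nil, List.reverse_singleton, List.singleton_append,
      pvBGo]
    by_cases hl : PySem.Str.startswith l "## "
    · simp only [pvAStep, hl, if_true]
      exact ⟨fun h => by simp at h, fun t ht => by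
        simp only [Option.some.injEq] at ht; subst ht; simp⟩
    · simp only [pvAStep, hl, if_false, Bool.false_eq_true]
      rcases hcur : (ls.foldl pvAStep (none, [], [])).1 with _ | t0
      · simp only [hcur, Option.isSome_none, Bool.false_eq_true, if_false]
        exact ⟨fun _ => ⟨((ih (l :: acc)).1 hcur).1, ((ih (l :: acc)).1 hcur).2⟩,
          fun t ht => by simp at ht⟩
      · simp only [Option.isSome_some, if_true]
        refine ⟨fun h => by simp at h, fun t ht => ?_⟩
        simp only [Option.some.injEq] at ht; subst ht
        have := (ih (l :: acc)).2 t0 hcur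
        rw [this]
        simp

theorem parse_latest_section_eq (md : String) :
    parse_latest_section md = parse_latest_section_alt md := by
  unfold parse_latest_section parse_latest_section_alt
  have h := pv_key (PySem.Str.splitlines md) []
  rcases hcur : ((PySem.Str.splitlines md).foldl pvAStep (none, [], [])).1 with _ | t
  · have ⟨hsec, hb⟩ := h.1 hcur
    simp [hcur, hsec, hb, PySem.List.pyGet?]
  · have hb := h.2 t hcur
    rw [hb]
    simp [hcur, PySem.List.pyGet?_neg_one]

-- ===== VERDICT (by name: the statement is the Claim_ definition above) =====
theorem parse_latest_section_spec : Claim_equal_parse_latest_section := by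
  intro md _
  exact parse_latest_section_eq md
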